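-- pv_equiv track=rewrite | github.com/pypi-data/pypi-mirror-396 | packages/analyst-klondike/analyst_klondike-1.0.17-py3-none-any.whl/analyst_klondike/features/code/wrap_func.py | inline_code
-- ===== SOURCE A (Python) =====
-- from textwrap import dedent
--
-- def inline_code(code_func: str) -> str:
--     code_wrapper = """\
--         def solution_wrapper():
--
--             {code_func}
--
--             return solution
--         """
--     # ко второй строке и далее долбавляем один таб
--     code_func_lines = dedent(code_func).split('\n')
--     code_wrapper_lines = dedent(code_wrapper).split('\n')
--     res_lines: list[str] = []
--     for line in code_wrapper_lines:
--         if line.strip() == "{code_func}":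
--             for func_line in code_func_lines:
--                 res_lines.append("\t" + func_line)
--         else:
--             res_lines.append(line)
--
--     return "\n".join(res_lines)
-- ===== SOURCE B (Python) =====
-- from textwrap import dedent
--
--
-- def inline_code(code_func: str) -> str:
--     code_wrapper = """\
--         def solution_wrapper():
--
--             {code_func}
--
--             return solution
--         """
--     body = "\n".join("\t" + line for line in dedent(code_func).split("\n"))
--     wrapper = dedent(code_wrapper)
--     prefix, _, suffix = wrapper.partition("    {code_func}")
--     return prefix + body + suffix
-- ===== Notes on version B (the rewrite author's own statement) =====
-- stated objective: simpler
-- what changed: B precomputes the tab-indented body once and splices it into the dedented wrapper with a single partition around the ' {code_func}' line, instead of A's per-line loop over the wrapper with a strip-and-branch test.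
import Mathlib
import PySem

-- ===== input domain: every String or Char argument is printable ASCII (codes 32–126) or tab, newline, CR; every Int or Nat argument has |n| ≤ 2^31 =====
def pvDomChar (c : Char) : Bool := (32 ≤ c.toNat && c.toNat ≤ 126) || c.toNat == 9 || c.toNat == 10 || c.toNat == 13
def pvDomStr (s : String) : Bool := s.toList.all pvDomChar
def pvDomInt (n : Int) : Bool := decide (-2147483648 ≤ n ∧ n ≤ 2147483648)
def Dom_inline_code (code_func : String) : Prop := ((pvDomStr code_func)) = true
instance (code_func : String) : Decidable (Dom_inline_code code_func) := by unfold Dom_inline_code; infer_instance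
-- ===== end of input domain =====

-- B replaces A's per-line loop over the wrapper (strip-and-branch on every line) by building the
-- tab-indented body once and splicing it in with a single partition around the placeholder line;
-- same return value on every input (objective: simpler).

-- ===== PORT A =====
-- Shared helper: exact port of CPython 3.11's textwrap.dedent (both Pythons call it).
-- dedent treats only ' ' and '\t' as indentation characters.
def pvIsIndentChar (c : Char) : Bool := c == ' ' || c == '\t'

-- dedent's margin-merging step: for two leading-whitespace runs it keeps the longest common
-- prefix (textwrap's three cases — startswith either way, else truncate at first mismatch).
def pvMargin2 : List Char → List Char → List Char
  | a :: as, b :: bs => if a = b then a :: pvMargin2 as bs else []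
  | _, _ => []

-- textwrap.dedent(text), ported step for step on the '\n'-split lines:
-- 1. _whitespace_only_re.sub('', text)  : lines made only of ' '/'\t' become empty
-- 2. _leading_whitespace_re.findall     : the leading ' '/'\t' run of every remaining non-empty line
-- 3. the margin loop                    : fold pvMargin2 over those runs (None ↦ [])
-- 4. re.sub('(?m)^'+margin, '', text)   : strip margin from every line that starts with it
def pvDedent (s : List Char) : List Char :=
  let lines0 := PySem.Chars.splitOn s ['\n']
  let lines1 := lines0.map (fun l => if !l.isEmpty && l.all pvIsIndentChar then [] else l)
  let indents := (lines1.filter (fun l => !l.isEmpty)).map (fun l => l.takeWhile pvIsIndentChar)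
  let margin := match indents with
    | [] => []
    | i :: rest => rest.foldl pvMargin2 i
  let lines2 := if margin.isEmpty then lines1
    else lines1.map (fun l => if margin.isPrefixOf l then l.drop margin.length else l)
  PySem.Chars.join ['\n'] lines2

-- the code_wrapper literal of Source A (the body of the triple-quoted string)
def pvWrapperLit : List Char :=
  "        def solution_wrapper():\n\n            {code_func}\n\n            return solution\n        ".toList

def inline_code (code_func : String) : String :=
  let code_func_lines := PySem.Chars.splitOn (pvDedent code_func.toList) ['\n']
  let code_wrapper_lines := PySem.Chars.splitOn (pvDedent pvWrapperLit) ['\n']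
  let res_lines : List (List Char) := code_wrapper_lines.foldl
    (fun acc line =>
      if PySem.Chars.strip line = "{code_func}".toList then
        acc ++ code_func_lines.map (fun func_line => '\t' :: func_line)
      else
        acc ++ [line])
    []
  String.ofList (PySem.Chars.join ['\n'] res_lines)

-- ===== PORT B =====
-- str.partition(sep): (part before, sep, part after); (s, '', '') if sep does not occur
def pvPartition (s sep : List Char) : List Char × List Char × List Char :=
  let i := PySem.Chars.find s sep
  if i < 0 then (s, [], [])
  else (s.take i.toNat, sep, s.drop (i.toNat + sep.length))

def inline_code_alt (code_func : String) : String :=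
  let body := PySem.Chars.join ['\n']
    ((PySem.Chars.splitOn (pvDedent code_func.toList) ['\n']).map (fun line => '\t' :: line))
  let wrapper := pvDedent pvWrapperLit
  let p := pvPartition wrapper "    {code_func}".toList
  String.ofList (p.1 ++ body ++ p.2.2)

-- ===== PRECONDITION & SPEC =====
def Spec_inline_code (code_func : String) (out : String) : Prop := out = inline_code_alt code_func
instance (code_func : String) (out : String) : Decidable (Spec_inline_code code_func out) := by unfold Spec_inline_code; infer_instance

-- ===== CLAIM (what is proved, stated in full; the proofs are below) =====
def Claim_equal_inline_code : Prop := ∀ (code_func : String), Dom_inline_code code_func → Spec_inline_code code_func (inline_code code_func)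

-- ===== LEMMAS AND PROOFS =====
theorem pv_go_ne_nil (sep : List Char) :
    ∀ (fuel : Nat) (l cur : List Char) (acc : List (List Char)),
      PySem.Chars.splitOn.go sep fuel l cur acc ≠ [] := by
  intro fuel
  induction fuel with
  | zero => intro l cur acc; simp [PySem.Chars.splitOn.go]
  | succ n ih =>
    intro l cur acc
    cases l with
    | nil => simp [PySem.Chars.splitOn.go]
    | cons c rest =>
      simp only [PySem.Chars.splitOn.go]
      split_ifs with h
      · exact ih _ _ _
      · exact ih _ _ _

theorem pv_splitOn_ne_nil (s sep : List Char) : PySem.Chars.splitOn s sep ≠ [] := by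
  unfold PySem.Chars.splitOn
  exact pv_go_ne_nil _ _ _ _ _

theorem pv_join_append (s : List Char) :
    ∀ (M N : List (List Char)), M ≠ [] → N ≠ [] →
      PySem.Chars.join s (M ++ N) = PySem.Chars.join s M ++ s ++ PySem.Chars.join s N := by
  intro M
  induction M with
  | nil => intro N h; exact absurd rfl h
  | cons m t ih =>
    intro N _ hN
    cases t with
    | nil =>
      cases N with
      | nil => exact absurd rfl hN
      | cons n nt =>
        simp [PySem.Chars.join_cons_cons, PySem.Chars.join_singleton]
    | cons m2 t2 =>
      have hx : PySem.Chars.join s ((m :: m2 :: t2) ++ N)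
          = m ++ s ++ PySem.Chars.join s ((m2 :: t2) ++ N) :=
        PySem.Chars.join_cons_cons s m m2 (t2 ++ N)
      rw [hx, PySem.Chars.join_cons_cons s m m2 t2, ih N (by simp) hN]
      simp [List.append_assoc]

theorem pv_main (code_func : String) : inline_code code_func = inline_code_alt code_func := by
  simp only [inline_code, inline_code_alt]
  have hW : PySem.Chars.splitOn (pvDedent pvWrapperLit) ['\n'] =
      ["def solution_wrapper():".toList, [], "    {code_func}".toList, [],
       "    return solution".toList, []] := by decide
  have hP : pvPartition (pvDedent pvWrapperLit) "    {code_func}".toList =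
      ("def solution_wrapper():\n\n".toList, "    {code_func}".toList,
       "\n\n    return solution\n".toList) := by decide
  simp only [hW, hP]
  set L := PySem.Chars.splitOn (pvDedent code_func.toList) ['\n'] with hL
  have hLne : L ≠ [] := pv_splitOn_ne_nil _ _
  set M := L.map (fun line => '\t' :: line) with hM
  have hMne : M ≠ [] := fun h => hLne (List.map_eq_nil_iff.mp h)
  have c_head : ¬ (PySem.Chars.strip "def solution_wrapper():".toList = "{code_func}".toList) := by decide
  have c_empty : ¬ (PySem.Chars.strip ([] : List Char) = "{code_func}".toList) := by decide
  have c_ph : PySem.Chars.strip "    {code_func}".toList = "{code_func}".toList := by decide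
  have c_ret : ¬ (PySem.Chars.strip "    return solution".toList = "{code_func}".toList) := by decide
  simp only [List.foldl_cons, List.foldl_nil]
  rw [if_neg c_head, if_neg c_empty, if_pos c_ph, if_neg c_empty, if_neg c_ret, if_neg c_empty]
  have hshape : (([] ++ ["def solution_wrapper():".toList] ++ [([] : List Char)] ++ M
      ++ [([] : List Char)] ++ ["    return solution".toList] ++ [([] : List Char)])
      : List (List Char))
      = ["def solution_wrapper():".toList, ([] : List Char)]
        ++ (M ++ [([] : List Char), "    return solution".toList, ([] : List Char)]) := by
    simp
  rw [hshape]
  rw [pv_join_append ['\n'] ["def solution_wrapper():".toList, ([] : List Char)]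
      (M ++ [([] : List Char), "    return solution".toList, ([] : List Char)])
      (by simp) (by simp)]
  rw [pv_join_append ['\n'] M
      [([] : List Char), "    return solution".toList, ([] : List Char)] hMne (by simp)]
  have h1 : PySem.Chars.join ['\n'] ["def solution_wrapper():".toList, ([] : List Char)]
      = "def solution_wrapper():\n".toList := by decide
  have h2 : PySem.Chars.join ['\n']
      [([] : List Char), "    return solution".toList, ([] : List Char)]
      = "\n    return solution\n".toList := by decide
  rw [h1, h2]
  have e1 : ("def solution_wrapper():\n".toList ++ ['\n'] : List Char)
      = "def solution_wrapper():\n\n".toList := by decide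
  have e2 : (['\n'] ++ "\n    return solution\n".toList : List Char)
      = "\n\n    return solution\n".toList := by decide
  rw [e1, List.append_assoc (PySem.Chars.join ['\n'] M) ['\n'] "\n    return solution\n".toList,
      e2, ← List.append_assoc]

-- ===== VERDICT (by name: the statement is the Claim_ definition above) =====
theorem inline_code_spec : Claim_equal_inline_code := by
  intro code_func _
  unfold Spec_inline_code
  exact pv_main code_func
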